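-- pv_equiv track=rewrite | github.com/DevDegree/eng-intern-challenge | python/conversion.py | position_to_braille
-- ===== SOURCE A (Python) =====
-- def position_to_braille(pos):
--     res = str(pos)
--     braille = ['.','.','.','.','.','.']
--     pos_map = [1, 4, 2, 5, 3, 6]
--     for i in range(len(pos_map)):
--         if str(pos_map[i]) in res:
--             braille[i] = "O"
--     return ''.join(braille)
-- ===== SOURCE B (Python) =====
-- def position_to_braille(pos):
--     idx = {'1': 0, '4': 1, '2': 2, '5': 3, '3': 4, '6': 5}
--     braille = ['.'] * 6
--     for ch in str(pos):
--         if ch in idx: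
--             braille[idx[ch]] = 'O'
--     return ''.join(braille)
-- ===== Notes on version B (the rewrite author's own statement) =====
-- stated objective: alternative
-- what changed: B makes a single pass over the digits of str(pos), marking output cells through a digit-to-index dict, instead of A's six substring scans of str(pos), one per target digit.
import Mathlib
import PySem

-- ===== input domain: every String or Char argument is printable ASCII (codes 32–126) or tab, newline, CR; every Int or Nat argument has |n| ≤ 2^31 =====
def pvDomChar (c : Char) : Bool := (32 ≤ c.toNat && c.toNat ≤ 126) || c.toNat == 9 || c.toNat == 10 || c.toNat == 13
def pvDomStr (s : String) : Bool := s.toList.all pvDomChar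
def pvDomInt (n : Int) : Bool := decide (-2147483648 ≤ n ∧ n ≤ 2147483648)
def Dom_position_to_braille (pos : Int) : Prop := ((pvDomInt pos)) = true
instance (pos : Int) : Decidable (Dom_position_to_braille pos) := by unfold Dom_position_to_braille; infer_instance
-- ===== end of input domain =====

-- B replaces A's six substring scans of str(pos) with one pass over its digits via a digit→index dict; alternative decomposition, same cost class.


-- ===== PORT A =====
-- res = str(pos); for i in range(6): if str(pos_map[i]) in res: braille[i] = 'O'
def position_to_braille (pos : Int) : String :=
  let res := PySem.Int.toChars pos
  let braille : List Char := ['.', '.', '.', '.', '.', '.']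
  let pos_map : List Int := [1, 4, 2, 5, 3, 6]
  let braille :=
    (List.range pos_map.length).foldl
      (fun b i =>
        if PySem.Chars.isIn (PySem.Int.toChars (PySem.List.pyGetD pos_map (Int.ofNat i) 0)) res
        then b.set i 'O' else b)
      braille
  String.mk braille

-- ===== PORT B =====
-- idx = {'1':0,'4':1,'2':2,'5':3,'3':4,'6':5}; one pass over str(pos) setting braille[idx[ch]]
def pvIdxDict : PySem.Dict Char Nat :=
  PySem.Dict.ofList [('1', 0), ('4', 1), ('2', 2), ('5', 3), ('3', 4), ('6', 5)]

def position_to_braille_alt (pos : Int) : String :=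
  let braille : List Char := ['.', '.', '.', '.', '.', '.']
  let braille :=
    (PySem.Int.toChars pos).foldl
      (fun b ch =>
        match pvIdxDict.get? ch with
        | some j => b.set j 'O'
        | none => b)
      braille
  String.mk braille

-- ===== PRECONDITION & SPEC =====
def Spec_position_to_braille (pos : Int) (out : String) : Prop := out = position_to_braille_alt pos
instance (pos : Int) (out : String) : Decidable (Spec_position_to_braille pos out) := by unfold Spec_position_to_braille; infer_instance

-- ===== CLAIM (what is proved, stated in full; the proofs are below) =====
def Claim_equal_position_to_braille : Prop := ∀ (pos : Int), Dom_position_to_braille pos → Spec_position_to_braille pos (position_to_braille pos)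

-- ===== LEMMAS AND PROOFS =====

-- single-character substring test = character membership
theorem singleton_infix_iff_mem (c : Char) (l : List Char) : [c] <:+: l ↔ c ∈ l := by
  constructor
  · intro h; exact h.subset (List.mem_singleton_self c)
  · intro h
    obtain ⟨s, t, rfl⟩ := List.append_of_mem h
    exact ⟨s, t, by simp⟩

-- the mark a cell holds after scanning cs, starting from a
def pvMark (d : Char) (cs : List Char) (a : Char) : Char := if d ∈ cs then 'O' else a

theorem pvIdxDict_eq :
    pvIdxDict = PySem.Dict.mk [('1', 0), ('4', 1), ('2', 2), ('5', 3), ('3', 4), ('6', 5)] := by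
  rfl

-- B's loop invariant: each of the six cells ends as pvMark of its digit
theorem alt_fold_eq (cs : List Char) (a0 a1 a2 a3 a4 a5 : Char) :
    cs.foldl
      (fun b ch =>
        match pvIdxDict.get? ch with
        | some j => b.set j 'O'
        | none => b)
      [a0, a1, a2, a3, a4, a5] =
    [pvMark '1' cs a0, pvMark '4' cs a1, pvMark '2' cs a2,
     pvMark '5' cs a3, pvMark '3' cs a4, pvMark '6' cs a5] := by
  induction cs generalizing a0 a1 a2 a3 a4 a5 with
  | nil => simp [pvMark]
  | cons c cs ih =>
    simp only [List.foldl_cons]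
    have hstep :
        (match pvIdxDict.get? c with
          | some j => List.set [a0, a1, a2, a3, a4, a5] j 'O'
          | none => [a0, a1, a2, a3, a4, a5]) =
        (if c = '1' then ['O', a1, a2, a3, a4, a5]
         else if c = '4' then [a0, 'O', a2, a3, a4, a5]
         else if c = '2' then [a0, a1, 'O', a3, a4, a5]
         else if c = '5' then [a0, a1, a2, 'O', a4, a5]
         else if c = '3' then [a0, a1, a2, a3, 'O', a5]
         else if c = '6' then [a0, a1, a2, a3, a4, 'O']
         else [a0, a1, a2, a3, a4, a5]) := by
      split_ifs with h1 h2 h3 h4 h5 h6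
      · subst h1; rfl
      · subst h2; rfl
      · subst h3; rfl
      · subst h4; rfl
      · subst h5; rfl
      · subst h6; rfl
      · simp [pvIdxDict_eq, Ne.symm h1, Ne.symm h2,
          Ne.symm h3, Ne.symm h4, Ne.symm h5, Ne.symm h6, PySem.Dict.get?]
    rw [hstep]
    have hm : ∀ d a, pvMark d (c :: cs) a = if d = c then 'O' else pvMark d cs a := by
      intro d a
      simp only [pvMark, List.mem_cons]
      by_cases hdc : d = c <;> by_cases hdm : d ∈ cs <;> simp [hdc, hdm]
    have hO : ∀ d, pvMark d cs 'O' = 'O' := by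
      intro d; simp only [pvMark]; split <;> rfl
    split_ifs with h1 h2 h3 h4 h5 h6
    · subst h1; simp [ih, hm, hO]
    · subst h2; simp [ih, hm, hO]
    · subst h3; simp [ih, hm, hO]
    · subst h4; simp [ih, hm, hO]
    · subst h5; simp [ih, hm, hO]
    · subst h6; simp [ih, hm, hO]
    · simp [ih, hm, Ne.symm h1, Ne.symm h2, Ne.symm h3, Ne.symm h4, Ne.symm h5, Ne.symm h6]

-- ===== VERDICT (by name: the statement is the Claim_ definition above) =====
theorem position_to_braille_spec : Claim_equal_position_to_braille := by
  intro pos _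
  show position_to_braille pos = position_to_braille_alt pos
  simp only [position_to_braille, position_to_braille_alt]
  rw [alt_fold_eq]
  simp only [List.length_cons, List.length_nil, List.range_succ, List.range_zero,
    List.foldl_append, List.foldl_cons, List.foldl_nil, List.nil_append]
  have g0 : PySem.Int.toChars (PySem.List.pyGetD [(1:Int),4,2,5,3,6] (Int.ofNat 0) 0) = ['1'] := by rfl
  have g1 : PySem.Int.toChars (PySem.List.pyGetD [(1:Int),4,2,5,3,6] (Int.ofNat 1) 0) = ['4'] := by rfl
  have g2 : PySem.Int.toChars (PySem.List.pyGetD [(1:Int),4,2,5,3,6] (Int.ofNat 2) 0) = ['2'] := by rfl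
  have g3 : PySem.Int.toChars (PySem.List.pyGetD [(1:Int),4,2,5,3,6] (Int.ofNat 3) 0) = ['5'] := by rfl
  have g4 : PySem.Int.toChars (PySem.List.pyGetD [(1:Int),4,2,5,3,6] (Int.ofNat 4) 0) = ['3'] := by rfl
  have g5 : PySem.Int.toChars (PySem.List.pyGetD [(1:Int),4,2,5,3,6] (Int.ofNat 5) 0) = ['6'] := by rfl
  have hsing : ∀ (c : Char) (r : List Char), (PySem.Chars.isIn [c] r = true) = (c ∈ r) := by
    intro c r
    simp [PySem.Chars.isIn_iff_infix, singleton_infix_iff_mem]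
  rw [g0, g1, g2, g3, g4, g5]
  simp only [hsing, pvMark]
  split_ifs <;> rfl
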